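-- pv_equiv track=rewrite | github.com/dumaron/martin | apps/website/utils/text_diff.py | _preserve_spaces
-- ===== SOURCE A (Python) =====
-- def _preserve_spaces(text):
-- 	"""
-- 	Convert consecutive spaces to &nbsp; entities to preserve them in HTML.
-- 	Keeps single spaces as regular spaces, converts multiple consecutive spaces to &nbsp;
-- 	"""
-- 	if not text:
-- 		return text
--
-- 	result = []
-- 	i = 0
-- 	while i < len(text):
-- 		if text[i] == ' ':
-- 			# Count consecutive spaces
-- 			space_count = 0
-- 			j = i
-- 			while j < len(text) and text[j] == ' ':
-- 				space_count += 1
-- 				j += 1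
--
-- 			# If multiple spaces, convert all to &nbsp;
-- 			if space_count > 1:
-- 				result.append('&nbsp;' * space_count)
-- 			else:
-- 				result.append(' ')
--
-- 			i = j
-- 		else:
-- 			result.append(text[i])
-- 			i += 1
--
-- 	return ''.join(result)
-- ===== SOURCE B (Python) =====
-- def _sep(k):
-- 	return ' ' if k == 1 else '&nbsp;' * k
--
-- def _preserve_spaces(text):
-- 	if not text:
-- 		return text
-- 	parts = text.split(' ')
-- 	out = [parts[0]]
-- 	empties = 0
-- 	for p in parts[1:]:
-- 		if p == '':
-- 			empties += 1
-- 		else: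
-- 			out.append(_sep(empties + 1))
-- 			out.append(p)
-- 			empties = 0
-- 	if empties:
-- 		out.append(_sep(empties))
-- 	return ''.join(out)
-- ===== Notes on version B (the rewrite author's own statement) =====
-- stated objective: faster
-- what changed: B first splits the text on the space character into segments via str.split and then reassembles them, deriving each space-run's length from the count of consecutive empty segments, instead of A's per-character index loop with an inner while that re-scans each run.
import Mathlib
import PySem

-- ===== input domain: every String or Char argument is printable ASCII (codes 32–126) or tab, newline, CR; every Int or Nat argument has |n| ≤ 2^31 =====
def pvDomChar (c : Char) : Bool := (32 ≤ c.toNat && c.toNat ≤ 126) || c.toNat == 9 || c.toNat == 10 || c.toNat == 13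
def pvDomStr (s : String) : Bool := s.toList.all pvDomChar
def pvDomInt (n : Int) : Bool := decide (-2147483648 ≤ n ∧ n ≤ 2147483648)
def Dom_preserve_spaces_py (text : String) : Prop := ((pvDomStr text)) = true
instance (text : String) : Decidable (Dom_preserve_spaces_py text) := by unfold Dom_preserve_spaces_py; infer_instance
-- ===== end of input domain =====

-- B splits the text into space-separated segments via str.split and reassembles them,
-- reading each space-run's length off the count of consecutive empty segments, instead of
-- A's per-character index loop with an inner run-rescanning while (objective: faster,
-- measured).

-- ===== PORT A =====
-- inner while loop: `while j < len(text) and text[j] == ' ': space_count += 1; j += 1`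
-- (text[j] ported as getD; the guard ensures the index is in range, so this is exact;
-- the fuel argument only bounds the iteration count and is always supplied sufficiently)
def pvA_inner (cs : List Char) : Nat → Nat → Nat → Nat × Nat
  | 0, sc, j => (sc, j)
  | fuel + 1, sc, j =>
    if j < cs.length ∧ cs.getD j ' ' = ' ' then pvA_inner cs fuel (sc + 1) (j + 1)
    else (sc, j)

-- outer while loop over i, appending pieces to `result`
def pvA_outer (cs : List Char) : Nat → Nat → List String → List String
  | 0, _, result => result
  | fuel + 1, i, result =>
    if i < cs.length then
      if cs.getD i ' ' = ' ' then
        let p := pvA_inner cs (cs.length - i) 0 i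
        pvA_outer cs fuel p.2
          (result ++ [if 1 < p.1 then String.join (List.replicate p.1 "&nbsp;") else " "])
      else
        pvA_outer cs fuel (i + 1) (result ++ [String.singleton (cs.getD i ' ')])
    else result

def preserve_spaces_py (text : String) : String :=
  if text = "" then text
  else String.join (pvA_outer text.toList text.toList.length 0 [])

-- ===== PORT B =====
-- `_sep(k)`
def pvSepB (k : Nat) : String :=
  if k = 1 then " " else String.join (List.replicate k "&nbsp;")

-- port of `text.split(' ')` (library call, ported by hand; exact for a one-char separator)
def pvSplit : List Char → List (List Char)
  | [] => [[]]
  | c :: rest =>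
    if c = ' ' then [] :: pvSplit rest
    else
      match pvSplit rest with
      | p :: ps => (c :: p) :: ps
      | [] => [[c]]   -- unreachable: pvSplit never returns []

-- B's for-loop over parts[1:], carrying (empties, out)
def pvBfold : List (List Char) → Nat → List String → List String
  | [], empties, out => if empties ≠ 0 then out ++ [pvSepB empties] else out
  | p :: ps, empties, out =>
    if p = [] then pvBfold ps (empties + 1) out
    else pvBfold ps 0 (out ++ [pvSepB (empties + 1), String.ofList p])

def preserve_spaces_py_alt (text : String) : String :=
  if text = "" then text
  else
    let parts := pvSplit text.toList
    String.join (pvBfold parts.tail 0 [String.ofList (parts.headD [])])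

-- ===== PRECONDITION & SPEC =====
def Spec_preserve_spaces_py (text : String) (out : String) : Prop := out = preserve_spaces_py_alt text
instance (text : String) (out : String) : Decidable (Spec_preserve_spaces_py text out) := by unfold Spec_preserve_spaces_py; infer_instance

-- ===== CLAIM (what is proved, stated in full; the proofs are below) =====
def Claim_equal_preserve_spaces_py : Prop := ∀ (text : String), Dom_preserve_spaces_py text → Spec_preserve_spaces_py text (preserve_spaces_py text)

-- ===== LEMMAS AND PROOFS =====

-- what one flush of a run of `run` spaces emits
def pvEmit (run : Nat) : String :=
  if run = 1 then " " else String.join (List.replicate run "&nbsp;")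

-- common reference function: the rest of the output, given pending run `run`
def pvF : List Char → Nat → String
  | [], run => pvEmit run
  | c :: rest, run =>
    if c = ' ' then pvF rest (run + 1)
    else pvEmit run ++ String.singleton c ++ pvF rest 0

theorem pvFoldl_append_str (b : List String) (s : String) :
    b.foldl (· ++ ·) s = s ++ b.foldl (· ++ ·) "" := by
  induction b generalizing s with
  | nil => simp [String.append_empty]
  | cons x xs ih =>
    simp only [List.foldl_cons]
    rw [ih (s ++ x), ih ("" ++ x)]
    simp [String.append_assoc, String.empty_append]

theorem pvJoin_append (a b : List String) :
    String.join (a ++ b) = String.join a ++ String.join b := by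
  simp only [String.join, List.foldl_append]
  exact pvFoldl_append_str b _

theorem pvEmit_zero : pvEmit 0 = "" := by
  simp [pvEmit, String.join]

theorem pvEmit_pos (k : Nat) (hk : 1 ≤ k) :
    (if 1 < k then String.join (List.replicate k "&nbsp;") else " ") = pvEmit k := by
  unfold pvEmit
  rcases Nat.lt_or_ge 1 k with h | h
  · simp [h, Nat.ne_of_gt h]
  · have : k = 1 := by omega
    simp [this]

-- pvF swallows the leading spaces into the run counter
theorem pvF_dropWhile (l : List Char) (run : Nat) :
    pvF l run = pvF (l.dropWhile (· == ' ')) (run + (l.takeWhile (· == ' ')).length) := by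
  induction l generalizing run with
  | nil => simp [pvF]
  | cons c rest ih =>
    by_cases hc : c = ' '
    · subst hc
      have h1 : pvF (' ' :: rest) run = pvF rest (run + 1) := by simp [pvF]
      rw [h1, ih]
      simp only [List.dropWhile_cons, List.takeWhile_cons, beq_self_eq_true, if_true,
        List.length_cons]
      congr 1
      omega
    · have hcb : (c == ' ') = false := by simp [hc]
      simp [hcb]

-- the head of dropWhile does not satisfy the predicate
theorem pvDropWhile_head (p : Char → Bool) (l : List Char) :
    l.dropWhile p = [] ∨
      ∃ c rest, l.dropWhile p = c :: rest ∧ p c = false := by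
  induction l with
  | nil => exact Or.inl rfl
  | cons c rest ih =>
    by_cases hc : p c
    · simpa [hc] using ih
    · exact Or.inr ⟨c, rest, by simp [hc], by simpa using hc⟩

-- inner-loop characterisation: with enough fuel it counts exactly the leading spaces from j
theorem pvA_inner_spec (cs : List Char) (fuel sc j : Nat) (hf : cs.length - j ≤ fuel) :
    pvA_inner cs fuel sc j =
      (sc + ((cs.drop j).takeWhile (· == ' ')).length,
       j + ((cs.drop j).takeWhile (· == ' ')).length) := by
  induction fuel generalizing sc j with
  | zero =>
    have hj : cs.length ≤ j := by omega
    simp [pvA_inner, List.drop_eq_nil_of_le hj]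
  | succ fuel ih =>
    by_cases h : j < cs.length ∧ cs.getD j ' ' = ' '
    · obtain ⟨hj, hsp⟩ := h
      have hd : cs.drop j = cs[j] :: cs.drop (j + 1) := List.drop_eq_getElem_cons hj
      have hget : cs[j] = ' ' := by rw [← List.getD_eq_getElem cs ' ' hj]; exact hsp
      rw [pvA_inner, if_pos ⟨hj, hsp⟩, ih (sc + 1) (j + 1) (by omega), hd, hget]
      simp only [List.takeWhile_cons, beq_self_eq_true, if_true, List.length_cons,
        Prod.mk.injEq]
      omega
    · rw [pvA_inner, if_neg h]
      rcases Nat.lt_or_ge j cs.length with hj | hj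
      · have hsp : ¬ cs.getD j ' ' = ' ' := fun hc => h ⟨hj, hc⟩
        have hd : cs.drop j = cs[j] :: cs.drop (j + 1) := List.drop_eq_getElem_cons hj
        have hget : (cs[j] == ' ') = false := by
          rw [← List.getD_eq_getElem cs ' ' hj]; simpa using hsp
        rw [hd]
        simp [hget]
      · simp [List.drop_eq_nil_of_le hj]

-- A's outer loop computes pvF of the remaining suffix
theorem pvA_outer_spec (fuel : Nat) (cs : List Char) (i : Nat) (res : List String)
    (hn : cs.length - i ≤ fuel) :
    String.join (pvA_outer cs fuel i res) = String.join res ++ pvF (cs.drop i) 0 := by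
  induction fuel generalizing i res with
  | zero =>
    have hi : cs.length ≤ i := by omega
    rw [pvA_outer]
    simp [List.drop_eq_nil_of_le hi, pvF, pvEmit_zero, String.append_empty]
  | succ fuel ih =>
    rcases Nat.lt_or_ge i cs.length with hi | hi
    · have hd : cs.drop i = cs[i] :: cs.drop (i + 1) := List.drop_eq_getElem_cons hi
      by_cases hsp : cs.getD i ' ' = ' '
      · -- space run
        have hget : cs[i] = ' ' := by rw [← List.getD_eq_getElem cs ' ' hi]; exact hsp
        set k := ((cs.drop i).takeWhile (· == ' ')).length with hk
        have hk1 : 1 ≤ k := by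
          rw [hk, hd, hget]; simp
        have hkle : k ≤ (cs.drop i).length := (List.takeWhile_sublist _).length_le
        have hklen : k ≤ cs.length - i := by simpa using hkle
        have hinner : pvA_inner cs (cs.length - i) 0 i = (k, i + k) := by
          rw [pvA_inner_spec cs (cs.length - i) 0 i (by omega)]; simp [hk]
        rw [pvA_outer]
        simp only [if_pos hi, if_pos hsp, hinner]
        rw [ih (i + k) _ (by omega), pvJoin_append]
        have hdw : cs.drop (i + k) = (cs.drop i).dropWhile (· == ' ') := by
          rw [← List.drop_drop]
          conv_lhs => rw [← List.takeWhile_append_dropWhile (p := (· == ' ')) (l := cs.drop i)]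
          exact List.drop_left' hk.symm
        rw [pvF_dropWhile (cs.drop i) 0, ← hk, ← hdw]
        have hjs : ∀ s : String, String.join [s] = s := by
          intro s; simp [String.join, String.empty_append]
        rw [hjs _, pvEmit_pos k hk1, String.append_assoc]
        congr 1
        rcases pvDropWhile_head (· == ' ') (cs.drop i) with hnil | ⟨c, rest, hcons, hcf⟩
        · rw [← hdw] at hnil
          rw [hnil]
          simp only [pvF, pvEmit_zero, String.append_empty, Nat.zero_add]
        · rw [← hdw] at hcons
          rw [hcons]
          have hcne : ¬ c = ' ' := by intro h; subst h; simp at hcf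
          simp only [pvF, if_neg hcne, pvEmit_zero, String.empty_append, Nat.zero_add,
            String.append_assoc]
      · -- single non-space character
        have hget : ¬ cs[i] = ' ' := by
          rw [← List.getD_eq_getElem cs ' ' hi]; exact hsp
        rw [pvA_outer]
        simp only [if_pos hi, if_neg hsp]
        rw [ih (i + 1) _ (by omega), pvJoin_append, hd]
        simp only [pvF, if_neg hget, pvEmit_zero, String.empty_append]
        rw [String.append_assoc]
        congr 1
        rw [List.getD_eq_getElem cs ' ' hi]
        simp [String.join, String.empty_append, String.singleton]
    · rw [pvA_outer]
      simp [Nat.not_lt.mpr hi, List.drop_eq_nil_of_le hi, pvF, pvEmit_zero,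
        String.append_empty]

-- ===== B-side lemmas =====

theorem pvSepB_eq_emit : pvSepB = pvEmit := rfl

theorem pvToList_cat (c : Char) (l : List Char) :
    (String.singleton c ++ String.ofList l).toList = c :: l := by simp

theorem pvOfList_cons (c : Char) (l : List Char) :
    String.ofList (c :: l) = String.singleton c ++ String.ofList l := by
  rw [← String.ofList_toList (s := String.singleton c ++ String.ofList l), pvToList_cat]

theorem pvOfList_nil : String.ofList ([] : List Char) = "" := by simp

-- the rest of B's output from the remaining parts and the pending empty-segment count
def pvH : List (List Char) → Nat → String
  | [], empties => if empties ≠ 0 then pvSepB empties else ""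
  | p :: ps, empties =>
    if p = [] then pvH ps (empties + 1)
    else pvSepB (empties + 1) ++ String.ofList p ++ pvH ps 0

theorem pvBfold_spec (ps : List (List Char)) (empties : Nat) (out : List String) :
    String.join (pvBfold ps empties out) = String.join out ++ pvH ps empties := by
  induction ps generalizing empties out with
  | nil =>
    by_cases h : empties = 0
    · simp [pvBfold, pvH, h, String.append_empty]
    · simp [pvBfold, pvH, h, String.join]
  | cons p rest ih =>
    by_cases hp : p = []
    · simp [pvBfold, pvH, hp, ih]
    · simp only [pvBfold, pvH, if_neg hp, ih, pvJoin_append]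
      simp [String.join, String.append_assoc]

theorem pvSplit_space (rest : List Char) : pvSplit (' ' :: rest) = [] :: pvSplit rest := by
  simp [pvSplit]

theorem pvF_cons (c : Char) (rest : List Char) (run : Nat) :
    pvF (c :: rest) run =
      if c = ' ' then pvF rest (run + 1) else pvEmit run ++ String.singleton c ++ pvF rest 0 := rfl

theorem pvH_cons (p : List Char) (ps : List (List Char)) (e : Nat) :
    pvH (p :: ps) e =
      if p = [] then pvH ps (e + 1) else pvSepB (e + 1) ++ String.ofList p ++ pvH ps 0 := rfl

theorem pvSplit_ne_nil (cs : List Char) : pvSplit cs ≠ [] := by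
  cases cs with
  | nil => simp [pvSplit]
  | cons c rest =>
    by_cases hc : c = ' '
    · simp [pvSplit, hc]
    · simp only [pvSplit, if_neg hc]
      cases pvSplit rest <;> simp

-- the split-and-reassemble computation equals the reference function pvF
theorem pvSplit_pvF (cs : List Char) :
    (∀ r, pvH (pvSplit cs) r = pvF cs (r + 1)) ∧
    String.ofList ((pvSplit cs).headD []) ++ pvH (pvSplit cs).tail 0 = pvF cs 0 := by
  induction cs with
  | nil =>
    constructor
    · intro r; simp [pvSplit, pvH, pvSepB_eq_emit, pvF]
    · simp [pvSplit, pvH, pvF, pvEmit, String.join]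
  | cons c rest ih =>
    obtain ⟨ihM, ihN⟩ := ih
    by_cases hc : c = ' '
    · subst hc
      constructor
      · intro r
        rw [pvSplit_space, pvH_cons, if_pos rfl, pvF_cons, if_pos rfl]
        exact ihM (r + 1)
      · rw [pvSplit_space]
        simp only [List.headD_cons, List.tail_cons]
        rw [pvF_cons, if_pos rfl, pvOfList_nil, String.empty_append]
        exact ihM 0
    · obtain ⟨p, ps, hps⟩ : ∃ p ps, pvSplit rest = p :: ps := by
        cases h : pvSplit rest with
        | nil => exact absurd h (pvSplit_ne_nil rest)
        | cons p ps => exact ⟨p, ps, rfl⟩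
      have hsplit : pvSplit (c :: rest) = (c :: p) :: ps := by
        simp [pvSplit, hc, hps]
      have hN' : String.ofList p ++ pvH ps 0 = pvF rest 0 := by
        have := ihN; rw [hps] at this; simpa using this
      constructor
      · intro r
        rw [hsplit, pvH_cons, if_neg (List.cons_ne_nil c p), pvF_cons, if_neg hc,
          pvSepB_eq_emit, pvOfList_cons, ← hN']
        simp only [String.append_assoc]
      · rw [hsplit]
        simp only [List.headD_cons, List.tail_cons]
        rw [pvF_cons, if_neg hc, pvEmit_zero, String.empty_append, pvOfList_cons,
          String.append_assoc, hN']

-- ===== VERDICT (by name: the statement is the Claim_ definition above) =====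
theorem preserve_spaces_py_spec : Claim_equal_preserve_spaces_py := by
  intro text _
  unfold Spec_preserve_spaces_py preserve_spaces_py preserve_spaces_py_alt
  by_cases h : text = ""
  · simp [h]
  · simp only [if_neg h]
    rw [pvA_outer_spec text.toList.length text.toList 0 [] (by omega), pvBfold_spec]
    have hjs : ∀ s : String, String.join [s] = s := by
      intro s; simp [String.join, String.empty_append]
    rw [hjs]
    simp only [List.drop_zero, String.join, List.foldl_nil, String.empty_append]
    exact ((pvSplit_pvF text.toList).2).symm
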